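-- pv_equiv track=rewrite | github.com/wyk18703232953/myResearch | codeComplex/data/filteredData/python/quadratic/python_quadratic_0097.py | generate_board
-- ===== SOURCE A (Python) =====
-- def generate_board(n, pattern_type):
--     # 根据 pattern_type 生成不同的测试棋盘
--     board = [['.' for _ in range(n)] for _ in range(n)]
--     if pattern_type == 0:
--         # 全空
--         return board
--     elif pattern_type == 1:
--         # 全 X
--         for i in range(n):
--             for j in range(n):
--                 board[i][j] = 'X'
--     elif pattern_type == 2:
--         # 对角线 X
--         for i in range(n):
--             board[i][i] = 'X'
--     elif pattern_type == 3:
--         # 反对角线 X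
--         for i in range(n):
--             board[i][n - 1 - i] = 'X'
--     elif pattern_type == 4:
--         # 棋盘格
--         for i in range(n):
--             for j in range(n):
--                 if (i + j) % 2 == 0:
--                     board[i][j] = 'X'
--
--     else:
--         # 稀疏 X：每行前半部分
--         for i in range(n):
--             for j in range(n // 2):
--                 board[i][j] = 'X'
--     return board
-- ===== SOURCE B (Python) =====
-- def generate_board(n, pattern_type):
--     preds = {
--         0: lambda i, j: False,
--         1: lambda i, j: True,
--         2: lambda i, j: i == j,
--         3: lambda i, j: j == n - 1 - i,
--         4: lambda i, j: (i + j) % 2 == 0,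
--     }
--     pred = preds.get(pattern_type, lambda i, j: j < n // 2)
--     return [['X' if pred(i, j) else '.' for j in range(n)] for i in range(n)]
-- ===== Notes on version B (the rewrite author's own statement) =====
-- stated objective: simpler
-- what changed: Replaces the blank-board-then-overlay imperative branches with a pattern_type -> cell-predicate lookup table and a single predicate-driven double comprehension.
import Mathlib
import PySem

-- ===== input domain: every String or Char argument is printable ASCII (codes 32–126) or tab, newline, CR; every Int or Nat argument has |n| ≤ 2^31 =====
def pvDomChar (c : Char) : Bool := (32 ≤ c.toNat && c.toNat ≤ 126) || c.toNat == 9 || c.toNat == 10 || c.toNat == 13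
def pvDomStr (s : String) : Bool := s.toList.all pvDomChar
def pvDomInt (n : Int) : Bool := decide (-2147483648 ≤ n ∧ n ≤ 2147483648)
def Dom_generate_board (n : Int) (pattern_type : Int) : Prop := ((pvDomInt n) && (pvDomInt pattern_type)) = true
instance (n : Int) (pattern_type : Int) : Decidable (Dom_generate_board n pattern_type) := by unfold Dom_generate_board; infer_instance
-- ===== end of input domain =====

-- B replaces A's blank-board-then-overlay branches by a pattern_type → cell-predicate
-- lookup table and one predicate-driven double comprehension (objective: simpler).

-- ===== PORT A =====
def generate_board (n : Int) (pattern_type : Int) : List (List String) :=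
  let board : List (List String) :=
    (PySem.List.pyRange 0 n 1).map (fun _ => (PySem.List.pyRange 0 n 1).map (fun _ => "."))
  if pattern_type == 0 then
    board
  else if pattern_type == 1 then
    (PySem.List.pyRange 0 n 1).foldl (fun b i =>
      (PySem.List.pyRange 0 n 1).foldl (fun b j =>
        PySem.List.pySetD b i (PySem.List.pySetD (PySem.List.pyGetD b i []) j "X")) b) board
  else if pattern_type == 2 then
    (PySem.List.pyRange 0 n 1).foldl (fun b i =>
      PySem.List.pySetD b i (PySem.List.pySetD (PySem.List.pyGetD b i []) i "X")) board
  else if pattern_type == 3 then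
    (PySem.List.pyRange 0 n 1).foldl (fun b i =>
      PySem.List.pySetD b i (PySem.List.pySetD (PySem.List.pyGetD b i []) (n - 1 - i) "X")) board
  else if pattern_type == 4 then
    (PySem.List.pyRange 0 n 1).foldl (fun b i =>
      (PySem.List.pyRange 0 n 1).foldl (fun b j =>
        if PySem.Int.mod (i + j) 2 == 0 then
          PySem.List.pySetD b i (PySem.List.pySetD (PySem.List.pyGetD b i []) j "X")
        else b) b) board
  else
    (PySem.List.pyRange 0 n 1).foldl (fun b i =>
      (PySem.List.pyRange 0 (PySem.Int.floordiv n 2) 1).foldl (fun b j =>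
        PySem.List.pySetD b i (PySem.List.pySetD (PySem.List.pyGetD b i []) j "X")) b) board

-- ===== PORT B =====
def generate_board_alt (n : Int) (pattern_type : Int) : List (List String) :=
  let preds : PySem.Dict Int (Int → Int → Bool) := PySem.Dict.ofList
    [ (0, fun _ _ => false)
    , (1, fun _ _ => true)
    , (2, fun i j => i == j)
    , (3, fun i j => j == n - 1 - i)
    , (4, fun i j => PySem.Int.mod (i + j) 2 == 0) ]
  let pred := preds.getD pattern_type (fun _ j => decide (j < PySem.Int.floordiv n 2))
  (PySem.List.pyRange 0 n 1).map (fun i =>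
    (PySem.List.pyRange 0 n 1).map (fun j => if pred i j then "X" else "."))

-- ===== PRECONDITION & SPEC =====
def Spec_generate_board (n : Int) (pattern_type : Int) (out : List (List String)) : Prop := out = generate_board_alt n pattern_type
instance (n : Int) (pattern_type : Int) (out : List (List String)) : Decidable (Spec_generate_board n pattern_type out) := by unfold Spec_generate_board; infer_instance

-- ===== CLAIM (what is proved, stated in full; the proofs are below) =====
def Claim_equal_generate_board : Prop := ∀ (n : Int) (pattern_type : Int), Dom_generate_board n pattern_type → Spec_generate_board n pattern_type (generate_board n pattern_type)

-- ===== LEMMAS AND PROOFS =====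

-- setting index i back to its own value is the identity
lemma pySetD_self {α : Type} (b : List α) (i : Int) (d : α) (h0 : 0 ≤ i)
    (h1 : i.toNat < b.length) :
    PySem.List.pySetD b i (PySem.List.pyGetD b i d) = b := by
  rw [PySem.List.pySetD_of_nonneg _ _ h0,
      PySem.List.pyGetD_eq_getElem _ _ h0 (by omega)]
  exact List.set_getElem_self h1

-- Python's row aliasing: a loop that each step rewrites only row i of the board
-- (conditionally) is one rewrite of row i by the corresponding row-level loop
lemma foldl_row_if {α : Type} (i : Int) (h0 : 0 ≤ i) (c : Int → Bool)
    (t : List α → Int → List α) :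
    ∀ (l : List Int) (b : List (List α)), i.toNat < b.length →
    l.foldl (fun b j => if c j then
        PySem.List.pySetD b i (t (PySem.List.pyGetD b i []) j) else b) b
      = PySem.List.pySetD b i (l.foldl (fun r j => if c j then t r j else r)
          (PySem.List.pyGetD b i [])) := by
  intro l
  induction l with
  | nil => intro b hb; simp [List.foldl]; exact (pySetD_self b i [] h0 hb).symm
  | cons j l ih =>
    intro b hb
    simp only [List.foldl_cons]
    by_cases hc : c j = true
    · have hget : PySem.List.pyGetD (PySem.List.pySetD b i (t (PySem.List.pyGetD b i []) j)) i []
          = t (PySem.List.pyGetD b i []) j := by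
        rw [PySem.List.pySetD_of_nonneg _ _ h0,
            PySem.List.pyGetD_eq_getElem _ _ h0 (by simp; omega)]
        simp
      have hlen : i.toNat < (PySem.List.pySetD b i (t (PySem.List.pyGetD b i []) j)).length := by
        simpa [PySem.List.length_pySetD]
      simp only [if_pos hc]
      rw [ih _ hlen, hget]
      rw [PySem.List.pySetD_of_nonneg _ _ h0, PySem.List.pySetD_of_nonneg _ _ h0,
          PySem.List.pySetD_of_nonneg _ _ h0, List.set_set]
    · simp only [if_neg hc]
      rw [ih _ hb]

-- generic overlay loop: folding "position i ← g i (old value at i)" over range(m)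
-- on a range-comprehension list rewrites its first m entries
lemma foldl_setmap {α : Type} (nn : Nat) (d : α) (F : List α → Int → List α)
    (g : Int → α → α)
    (hF : ∀ (xs : List α) (i : Int), xs.length = nn → 0 ≤ i → i < (nn : Int) →
      F xs i = PySem.List.pySetD xs i (g i (PySem.List.pyGetD xs i d))) :
    ∀ (m : Nat) (f : Int → α), m ≤ nn →
    (PySem.List.pyRange 0 (m : Int) 1).foldl F ((PySem.List.pyRange 0 (nn : Int) 1).map f)
      = (PySem.List.pyRange 0 (m : Int) 1).map (fun i => g i (f i))
        ++ (PySem.List.pyRange (m : Int) (nn : Int) 1).map f := by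
  intro m
  induction m with
  | zero => intro f hm; simp [PySem.List.pyRange_one_eq_nil]
  | succ m ih =>
    intro f hm
    have hm' : m ≤ nn := by omega
    have hcast : ((m + 1 : Nat) : Int) = (m : Int) + 1 := by push_cast; ring
    rw [hcast, PySem.List.pyRange_one_succ_right (by positivity),
        List.foldl_append, List.map_append, ih f hm']
    set P := (PySem.List.pyRange 0 (m : Int) 1).map (fun i => g i (f i)) with hP
    have hPlen : P.length = m := by
      simp [hP, PySem.List.length_pyRange_one]
    have hcons : PySem.List.pyRange (m : Int) (nn : Int) 1
        = (m : Int) :: PySem.List.pyRange ((m : Int) + 1) (nn : Int) 1 :=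
      PySem.List.pyRange_one_cons (by omega)
    rw [hcons]
    simp only [List.foldl_cons, List.foldl_nil, List.map_cons]
    have hblen : (P ++ f (m : Int) :: (PySem.List.pyRange ((m : Int) + 1) (nn : Int) 1).map f).length = nn := by
      simp [hPlen, PySem.List.length_pyRange_one]; omega
    rw [hF _ _ hblen (by positivity) (by omega)]
    have hget : PySem.List.pyGetD (P ++ f (m : Int) :: (PySem.List.pyRange ((m : Int) + 1) (nn : Int) 1).map f) (m : Int) d
        = f (m : Int) := by
      rw [PySem.List.pyGetD_natCast]
      simp [List.getD_eq_getElem?_getD, hPlen]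
    rw [hget, PySem.List.pySetD_natCast]
    have hset : (P ++ f (m : Int) :: (PySem.List.pyRange ((m : Int) + 1) (nn : Int) 1).map f).set m (g (m : Int) (f (m : Int)))
        = P ++ g (m : Int) (f (m : Int)) :: (PySem.List.pyRange ((m : Int) + 1) (nn : Int) 1).map f := by
      rw [← hPlen]; simp
    rw [hset]
    simp

-- a single assignment into a range-comprehension row
lemma pySetD_map_pyRange {α : Type} (nn : Nat) (i : Int) (h0 : 0 ≤ i) (_hlt : i < (nn : Int))
    (f : Int → α) (v : α) :
    PySem.List.pySetD ((PySem.List.pyRange 0 (nn : Int) 1).map f) i v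
      = (PySem.List.pyRange 0 (nn : Int) 1).map (fun j => if j == i then v else f j) := by
  rw [PySem.List.pySetD_of_nonneg _ _ h0]
  apply List.ext_getElem
  · simp
  · intro k h2 h3
    have hk : k < nn := by
      simpa [PySem.List.length_pyRange_one] using h3
    simp only [List.getElem_set, List.getElem_map, PySem.List.getElem_pyRange_one]
    have : i.toNat = k ↔ ((0 : Int) + k == i) = true := by
      simp; omega
    by_cases h : i.toNat = k
    · rw [if_pos h, if_pos (this.mp h)]
    · rw [if_neg h, if_neg (by intro hb; exact h (this.mpr hb))]

-- unconditional version of foldl_row_if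
lemma foldl_row {α : Type} (i : Int) (h0 : 0 ≤ i) (t : List α → Int → List α)
    (l : List Int) (b : List (List α)) (hb : i.toNat < b.length) :
    l.foldl (fun b j => PySem.List.pySetD b i (t (PySem.List.pyGetD b i []) j)) b
      = PySem.List.pySetD b i (l.foldl t (PySem.List.pyGetD b i [])) := by
  have h := foldl_row_if i h0 (fun _ => true) t l b hb
  simpa using h

-- ===== VERDICT (by name: the statement is the Claim_ definition above) =====
theorem generate_board_spec : Claim_equal_generate_board := by
  intro n pt _
  unfold Spec_generate_board
  by_cases hn : 0 ≤ n
  case neg =>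
    have hnil : PySem.List.pyRange 0 n 1 = [] := PySem.List.pyRange_one_eq_nil (by omega)
    simp only [generate_board, generate_board_alt, hnil, List.map_nil, List.foldl_nil]
    split_ifs <;> rfl
  obtain ⟨N, hN⟩ : ∃ N : Nat, n = (N : Int) := ⟨n.toNat, (Int.toNat_of_nonneg hn).symm⟩
  subst hN
  by_cases h0 : pt = 0
  · subst h0; rfl
  by_cases h1 : pt = 1
  · subst h1
    show (PySem.List.pyRange 0 ((N : Int)) 1).foldl (fun b i =>
        (PySem.List.pyRange 0 ((N : Int)) 1).foldl (fun b j =>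
          PySem.List.pySetD b i (PySem.List.pySetD (PySem.List.pyGetD b i []) j "X")) b)
        ((PySem.List.pyRange 0 ((N : Int)) 1).map (fun _ =>
          (PySem.List.pyRange 0 ((N : Int)) 1).map (fun _ => ".")))
      = (PySem.List.pyRange 0 ((N : Int)) 1).map (fun i =>
        (PySem.List.pyRange 0 ((N : Int)) 1).map (fun j => if (true : Bool) then "X" else "."))
    rw [foldl_setmap N []
        (fun b i => (PySem.List.pyRange 0 ((N : Int)) 1).foldl (fun b j =>
          PySem.List.pySetD b i (PySem.List.pySetD (PySem.List.pyGetD b i []) j "X")) b)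
        (fun i r => (PySem.List.pyRange 0 ((N : Int)) 1).foldl
          (fun r j => PySem.List.pySetD r j "X") r)
        (fun xs i hlen hi0 hiN => foldl_row i hi0 (fun r j => PySem.List.pySetD r j "X")
          (PySem.List.pyRange 0 ((N : Int)) 1) xs (by omega))
        N (fun _ => (PySem.List.pyRange 0 ((N : Int)) 1).map (fun _ => ".")) le_rfl]
    simp only [PySem.List.pyRange_one_eq_nil le_rfl, List.map_nil, List.append_nil]
    refine List.map_congr_left fun i hi => ?_
    rw [foldl_setmap N "." (fun r j => PySem.List.pySetD r j "X") (fun j x => "X")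
        (fun xs j hlen hj0 hjN => rfl) N (fun _ => ".") le_rfl]
    simp [PySem.List.pyRange_one_eq_nil le_rfl]
  by_cases h2 : pt = 2
  · subst h2
    show (PySem.List.pyRange 0 ((N : Int)) 1).foldl (fun b i =>
        PySem.List.pySetD b i (PySem.List.pySetD (PySem.List.pyGetD b i []) i "X"))
        ((PySem.List.pyRange 0 ((N : Int)) 1).map (fun _ =>
          (PySem.List.pyRange 0 ((N : Int)) 1).map (fun _ => ".")))
      = (PySem.List.pyRange 0 ((N : Int)) 1).map (fun i =>
        (PySem.List.pyRange 0 ((N : Int)) 1).map (fun j => if i == j then "X" else "."))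
    rw [foldl_setmap N []
        (fun b i => PySem.List.pySetD b i (PySem.List.pySetD (PySem.List.pyGetD b i []) i "X"))
        (fun i r => PySem.List.pySetD r i "X")
        (fun xs i hlen hi0 hiN => rfl)
        N (fun _ => (PySem.List.pyRange 0 ((N : Int)) 1).map (fun _ => ".")) le_rfl]
    simp only [PySem.List.pyRange_one_eq_nil le_rfl, List.map_nil, List.append_nil]
    refine List.map_congr_left fun i hi => ?_
    rw [PySem.List.mem_pyRange_one] at hi
    rw [pySetD_map_pyRange N i hi.1 hi.2]
    refine List.map_congr_left fun j hj => ?_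
    by_cases h : j = i
    · simp [h]
    · simp [h, Ne.symm h]
  by_cases h3 : pt = 3
  · subst h3
    show (PySem.List.pyRange 0 ((N : Int)) 1).foldl (fun b i =>
        PySem.List.pySetD b i (PySem.List.pySetD (PySem.List.pyGetD b i []) ((N : Int) - 1 - i) "X"))
        ((PySem.List.pyRange 0 ((N : Int)) 1).map (fun _ =>
          (PySem.List.pyRange 0 ((N : Int)) 1).map (fun _ => ".")))
      = (PySem.List.pyRange 0 ((N : Int)) 1).map (fun i =>
        (PySem.List.pyRange 0 ((N : Int)) 1).map (fun j => if j == (N : Int) - 1 - i then "X" else "."))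
    rw [foldl_setmap N []
        (fun b i => PySem.List.pySetD b i
          (PySem.List.pySetD (PySem.List.pyGetD b i []) ((N : Int) - 1 - i) "X"))
        (fun i r => PySem.List.pySetD r ((N : Int) - 1 - i) "X")
        (fun xs i hlen hi0 hiN => rfl)
        N (fun _ => (PySem.List.pyRange 0 ((N : Int)) 1).map (fun _ => ".")) le_rfl]
    simp only [PySem.List.pyRange_one_eq_nil le_rfl, List.map_nil, List.append_nil]
    refine List.map_congr_left fun i hi => ?_
    rw [PySem.List.mem_pyRange_one] at hi
    rw [pySetD_map_pyRange N ((N : Int) - 1 - i) (by omega) (by omega)]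
  by_cases h4 : pt = 4
  · subst h4
    show (PySem.List.pyRange 0 ((N : Int)) 1).foldl (fun b i =>
        (PySem.List.pyRange 0 ((N : Int)) 1).foldl (fun b j =>
          if PySem.Int.mod (i + j) 2 == 0 then
            PySem.List.pySetD b i (PySem.List.pySetD (PySem.List.pyGetD b i []) j "X")
          else b) b)
        ((PySem.List.pyRange 0 ((N : Int)) 1).map (fun _ =>
          (PySem.List.pyRange 0 ((N : Int)) 1).map (fun _ => ".")))
      = (PySem.List.pyRange 0 ((N : Int)) 1).map (fun i =>
        (PySem.List.pyRange 0 ((N : Int)) 1).map (fun j =>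
          if PySem.Int.mod (i + j) 2 == 0 then "X" else "."))
    rw [foldl_setmap N []
        (fun b i => (PySem.List.pyRange 0 ((N : Int)) 1).foldl (fun b j =>
          if PySem.Int.mod (i + j) 2 == 0 then
            PySem.List.pySetD b i (PySem.List.pySetD (PySem.List.pyGetD b i []) j "X")
          else b) b)
        (fun i r => (PySem.List.pyRange 0 ((N : Int)) 1).foldl
          (fun r j => if PySem.Int.mod (i + j) 2 == 0 then PySem.List.pySetD r j "X" else r) r)
        (fun xs i hlen hi0 hiN => foldl_row_if i hi0
          (fun j => PySem.Int.mod (i + j) 2 == 0) (fun r j => PySem.List.pySetD r j "X")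
          (PySem.List.pyRange 0 ((N : Int)) 1) xs (by omega))
        N (fun _ => (PySem.List.pyRange 0 ((N : Int)) 1).map (fun _ => ".")) le_rfl]
    simp only [PySem.List.pyRange_one_eq_nil le_rfl, List.map_nil, List.append_nil]
    refine List.map_congr_left fun i hi => ?_
    rw [foldl_setmap N "."
        (fun r j => if PySem.Int.mod (i + j) 2 == 0 then PySem.List.pySetD r j "X" else r)
        (fun j x => if PySem.Int.mod (i + j) 2 == 0 then "X" else x)
        (fun xs j hlen hj0 hjN => by
          by_cases hc : (PySem.Int.mod (i + j) 2 == 0) = true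
          · simp only [if_pos hc]
          · simp only [if_neg hc]
            exact (pySetD_self xs j "." hj0 (by omega)).symm)
        N (fun _ => ".") le_rfl]
    simp [PySem.List.pyRange_one_eq_nil le_rfl]
  · -- default branch: pattern_type not in the table
    have hpred : PySem.Dict.getD (PySem.Dict.ofList
        [ ((0 : Int), fun (_ _ : Int) => false)
        , (1, fun _ _ => true)
        , (2, fun i j => i == j)
        , (3, fun i j => j == (N : Int) - 1 - i)
        , (4, fun i j => PySem.Int.mod (i + j) 2 == 0) ]) pt
        (fun _ j => decide (j < PySem.Int.floordiv (N : Int) 2))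
        = (fun _ j => decide (j < PySem.Int.floordiv (N : Int) 2)) := by
      simp only [PySem.Dict.getD, PySem.Dict.get?]
      rw [show (PySem.Dict.ofList
        [ ((0 : Int), fun (_ _ : Int) => false)
        , (1, fun _ _ => true)
        , (2, fun i j => i == j)
        , (3, fun i j => j == (N : Int) - 1 - i)
        , (4, fun i j => PySem.Int.mod (i + j) 2 == 0) ]).items =
        [ ((0 : Int), fun (_ _ : Int) => false)
        , (1, fun _ _ => true)
        , (2, fun i j => i == j)
        , (3, fun i j => j == (N : Int) - 1 - i)
        , (4, fun i j => PySem.Int.mod (i + j) 2 == 0) ] from rfl]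
      rw [List.find?_cons_of_neg (by simp [Ne.symm h0]),
          List.find?_cons_of_neg (by simp [Ne.symm h1]),
          List.find?_cons_of_neg (by simp [Ne.symm h2]),
          List.find?_cons_of_neg (by simp [Ne.symm h3]),
          List.find?_cons_of_neg (by simp [Ne.symm h4]), List.find?_nil]
      rfl
    simp only [generate_board_alt]
    rw [hpred]
    simp only [generate_board]
    rw [if_neg (show ¬ ((pt == 0) = true) by simp [h0]),
        if_neg (show ¬ ((pt == 1) = true) by simp [h1]),
        if_neg (show ¬ ((pt == 2) = true) by simp [h2]),
        if_neg (show ¬ ((pt == 3) = true) by simp [h3]),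
        if_neg (show ¬ ((pt == 4) = true) by simp [h4])]
    have hM : PySem.Int.floordiv ((N : Int)) 2 = ((N / 2 : Nat) : Int) := by
      exact_mod_cast PySem.Int.floordiv_natCast N 2
    rw [hM]
    rw [foldl_setmap N []
        (fun b i => (PySem.List.pyRange 0 (((N / 2 : Nat) : Int)) 1).foldl (fun b j =>
          PySem.List.pySetD b i (PySem.List.pySetD (PySem.List.pyGetD b i []) j "X")) b)
        (fun i r => (PySem.List.pyRange 0 (((N / 2 : Nat) : Int)) 1).foldl
          (fun r j => PySem.List.pySetD r j "X") r)
        (fun xs i hlen hi0 hiN => foldl_row i hi0 (fun r j => PySem.List.pySetD r j "X")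
          (PySem.List.pyRange 0 (((N / 2 : Nat) : Int)) 1) xs (by omega))
        N (fun _ => (PySem.List.pyRange 0 ((N : Int)) 1).map (fun _ => ".")) le_rfl]
    simp only [PySem.List.pyRange_one_eq_nil le_rfl, List.map_nil, List.append_nil]
    refine List.map_congr_left fun i hi => ?_
    rw [foldl_setmap N "." (fun r j => PySem.List.pySetD r j "X") (fun j x => "X")
        (fun xs j hlen hj0 hjN => rfl) (N / 2) (fun _ => ".") (Nat.div_le_self N 2)]
    conv_rhs => rw [PySem.List.pyRange_one_append 0 (((N / 2 : Nat) : Int)) ((N : Int))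
      (by omega) (by omega)]
    rw [List.map_append]
    congr 1
    · refine List.map_congr_left fun j hj => ?_
      rw [PySem.List.mem_pyRange_one] at hj
      simp only [decide_eq_true_eq]
      rw [if_pos (by omega)]
    · refine List.map_congr_left fun j hj => ?_
      rw [PySem.List.mem_pyRange_one] at hj
      simp only [decide_eq_true_eq]
      rw [if_neg (by omega)]
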